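-- pv_equiv track=rewrite | github.com/tliddle1/advent-of-code | 2023/day07.py | getLargestCardGroup
-- ===== SOURCE A (Python) =====
-- def getLargestCardGroup(hand):
--     num_j = 0
--     d = {}
--     for c in hand:
--         if c in d.keys():
--             d[c] += 1
--         else:
--             d[c] = 1
--     max_v = 0
--     for v in d.values():
--         if v > max_v:
--             max_v = v
--     return max_v
-- ===== SOURCE B (Python) =====
-- def getLargestCardGroup(hand):
--     if not hand:
--         return 0
--     c = hand[0]
--     rest = ''.join(x for x in hand if x != c)
--     return max(hand.count(c), getLargestCardGroup(rest))
-- ===== Notes on version B (the rewrite author's own statement) =====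
-- stated objective: alternative
-- what changed: Replaces the build-a-count-dict-then-scan-values strategy with a recursive partition: count the first card across the whole hand, strip all its occurrences, recurse on the remainder, and take the max.
import Mathlib
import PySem

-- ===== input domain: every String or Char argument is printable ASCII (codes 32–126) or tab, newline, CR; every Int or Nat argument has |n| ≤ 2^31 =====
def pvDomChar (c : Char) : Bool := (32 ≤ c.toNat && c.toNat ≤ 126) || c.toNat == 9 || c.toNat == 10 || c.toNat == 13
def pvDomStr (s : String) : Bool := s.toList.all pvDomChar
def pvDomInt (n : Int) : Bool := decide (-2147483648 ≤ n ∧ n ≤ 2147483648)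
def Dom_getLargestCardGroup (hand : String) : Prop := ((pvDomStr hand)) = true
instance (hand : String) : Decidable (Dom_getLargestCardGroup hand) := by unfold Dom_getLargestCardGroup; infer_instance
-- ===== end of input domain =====

-- B replaces A's count-dict-then-scan-values with a recursive partition (count the first
-- card, strip it, recurse); same return value on every input (objective: alternative).

-- ===== PORT A =====
def getLargestCardGroup (hand : String) : Int :=
  -- num_j = 0 is assigned and never used in A; it does not affect the result
  let d : PySem.Dict Char Int :=
    hand.toList.foldl
      (fun d c => if d.contains c then d.modify c 0 (· + 1) else d.insert c 1)
      PySem.Dict.empty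
  d.values.foldl (fun max_v v => if v > max_v then v else max_v) 0

-- ===== PORT B =====
-- recursion of Source B on the character list of the hand
def pvAltGo (l : List Char) : Int :=
  match l with
  | [] => 0
  | c :: rest =>
      max ((PySem.List.count (c :: rest) c : Nat) : Int)
          (pvAltGo ((c :: rest).filter (fun x => x != c)))
termination_by l.length
decreasing_by
  simp only [List.filter, bne_self_eq_false]
  exact Nat.lt_succ_of_le (List.length_filter_le _ _)

def getLargestCardGroup_alt (hand : String) : Int := pvAltGo hand.toList

-- ===== PRECONDITION & SPEC =====
def Spec_getLargestCardGroup (hand : String) (out : Int) : Prop := out = getLargestCardGroup_alt hand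
instance (hand : String) (out : Int) : Decidable (Spec_getLargestCardGroup hand out) := by unfold Spec_getLargestCardGroup; infer_instance

-- ===== CLAIM (what is proved, stated in full; the proofs are below) =====
def Claim_equal_getLargestCardGroup : Prop := ∀ (hand : String), Dom_getLargestCardGroup hand → Spec_getLargestCardGroup hand (getLargestCardGroup hand)

-- ===== LEMMAS AND PROOFS =====

-- common reference value: the max (starting from 0) of the multiplicities of the distinct cards
def pvM (l : List Char) : Int :=
  ((PySem.Set.ofList l).map (fun k => ((List.count k l : Nat) : Int))).foldl max 0

-- A's dict-building step is exactly the counter step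
lemma pvStepA_eq :
    (fun (d : PySem.Dict Char Int) c => if d.contains c then d.modify c 0 (· + 1) else d.insert c 1)
      = (fun (d : PySem.Dict Char Int) c => d.modify c 0 (· + 1)) := by
  funext d c
  by_cases h : d.contains c
  · simp [h]
  · simp only [Bool.not_eq_true] at h
    simp [h, PySem.Dict.modify, PySem.Dict.getD_of_not_contains d 0 h]

lemma pvIfMax_eq : (fun (m v : Int) => if v > m then v else m) = (fun (m v : Int) => max m v) := by
  funext m v
  split_ifs with h <;> omega

-- A computes pvM
lemma pvA_eq (l : List Char) :
    (((l.foldl (fun d c => if d.contains c then d.modify c 0 (· + 1) else d.insert c 1)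
        PySem.Dict.empty).values).foldl (fun m v => if v > m then v else m) 0) = pvM l := by
  rw [pvStepA_eq, ← PySem.Dict.counter_eq_foldl, pvIfMax_eq]
  unfold pvM
  simp [PySem.Dict.values, PySem.Dict.items_counter, List.map_map, Function.comp_def]

-- foldl max commutes an element out front
lemma pvFoldlMax_shift (l : List Int) : ∀ a b : Int, l.foldl max (max b a) = max a (l.foldl max b) := by
  induction l with
  | nil => intro a b; simp [max_comm]
  | cons x l ih =>
      intro a b
      simp only [List.foldl_cons]
      rw [show max (max b a) x = max (max b x) a by
            rw [max_assoc, max_comm a x, ← max_assoc],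
          ih]

lemma pvFoldlMax_cons (x : Int) (l : List Int) :
    (x :: l).foldl max 0 = max x (l.foldl max 0) := by
  simp only [List.foldl_cons]
  exact pvFoldlMax_shift l x 0

-- Set.add commutes with filter
lemma pvAdd_filter (p : Char → Bool) (s : PySem.Set Char) (x : Char) :
    (PySem.Set.add s x).filter p = if p x then PySem.Set.add (s.filter p) x else s.filter p := by
  simp only [PySem.Set.add, PySem.Set.contains, List.contains_eq_mem]
  by_cases hx : x ∈ s
  · by_cases hp : p x
    · have hm : x ∈ s.filter p := List.mem_filter.mpr ⟨hx, hp⟩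
      simp [hx, hp, hm]
    · simp [hx, hp]
  · by_cases hp : p x
    · have hm : x ∉ s.filter p := fun hm => hx (List.mem_of_mem_filter hm)
      simp [hx, hp, hm, List.filter_append]
    · simp [hx, hp, List.filter_append]

-- Set.update commutes with filter
lemma pvUpdate_filter (p : Char → Bool) (t : List Char) :
    ∀ s : PySem.Set Char, (PySem.Set.update s t).filter p
      = PySem.Set.update (s.filter p) (t.filter p) := by
  induction t with
  | nil => intro s; simp [PySem.Set.update]
  | cons x t ih =>
      intro s
      simp only [PySem.Set.update, List.foldl_cons] at *
      by_cases hp : p x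
      · rw [show (x :: t).filter p = x :: t.filter p by simp [List.filter, hp]]
        simp only [List.foldl_cons]
        rw [ih, pvAdd_filter, if_pos hp]
      · rw [show (x :: t).filter p = t.filter p by simp [List.filter, hp]]
        rw [ih, pvAdd_filter, if_neg hp]

lemma pvOfList_filter (p : Char → Bool) (t : List Char) :
    (PySem.Set.ofList t).filter p = PySem.Set.ofList (t.filter p) := by
  have := pvUpdate_filter p t PySem.Set.empty
  simpa [PySem.Set.ofList, PySem.Set.update, PySem.Set.empty] using this

-- ofList of a cons: head, then the deduped tail with the head filtered out
lemma pvOfList_cons (c : Char) (t : List Char) :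
    PySem.Set.ofList (c :: t) = c :: PySem.Set.ofList (t.filter (fun x => x != c)) := by
  have h1 : PySem.Set.ofList (c :: t) = PySem.Set.update [c] t := rfl
  rw [h1, PySem.Set.update_eq_append_filter]
  have h2 : (PySem.Set.ofList t).filter (fun y => !PySem.Set.contains [c] y)
      = (PySem.Set.ofList t).filter (fun x => x != c) := by
    apply List.filter_congr
    intro y _
    by_cases hyc : y = c
    · subst hyc
      simp [PySem.Set.contains, List.contains_eq_mem]
    · simp [PySem.Set.contains, List.contains_eq_mem, bne, hyc]
  rw [h2, pvOfList_filter]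
  rfl

-- B computes pvM
theorem pvAltGo_eq : ∀ l : List Char, pvAltGo l = pvM l
  | [] => by simp [pvAltGo, pvM, PySem.Set.ofList, PySem.Set.empty]
  | c :: t => by
      have hf : (c :: t).filter (fun x => x != c) = t.filter (fun x => x != c) := by
        simp [List.filter]
      have ih := pvAltGo_eq (t.filter (fun x => x != c))
      rw [pvAltGo, hf, ih]
      unfold pvM
      rw [pvOfList_cons, List.map_cons, pvFoldlMax_cons]
      rw [PySem.List.count_eq]
      congr 1
      apply congrArg (List.foldl max 0)
      apply List.map_congr_left
      intro k hk
      have hkf : k ∈ t.filter (fun x => x != c) :=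
        (PySem.Set.mem_ofList _ k).mp hk
      have hkc : (k != c) = true := (List.mem_filter.mp hkf).2
      have hne : c ≠ k := fun h => by simp [h] at hkc
      have h1 : List.count k (t.filter (fun x => x != c)) = List.count k t :=
        List.count_filter hkc
      rw [h1, List.count_cons_of_ne hne]
termination_by l => l.length
decreasing_by
  exact Nat.lt_succ_of_le (List.length_filter_le _ _)

-- ===== VERDICT (by name: the statement is the Claim_ definition above) =====
theorem getLargestCardGroup_spec : Claim_equal_getLargestCardGroup := by
  intro hand _
  unfold Spec_getLargestCardGroup getLargestCardGroup getLargestCardGroup_alt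
  rw [pvA_eq, pvAltGo_eq]
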